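-- pv_equiv track=rewrite | github.com/RiftTeam/multicolor | multicolor.py | encode_rle16
-- ===== SOURCE A (Python) =====
-- def encode_rle16(data):
--     enc = ""
--     prev = ""
--     count = 1
--     for symbol in data:
--         value = chr(int(symbol, 16) + 65)
--         if value != prev:
--             if prev:
--                 enc = enc + prev
--                 if count == 2:
--                     enc = enc + prev
--                 elif count > 2:
--                     enc = enc + str(count - 1)
--             count = 1
--             prev = value
--         else:
--             count = count + 1
--     enc = enc + prev
--     if count == 2:
--         enc = enc + prev
--     elif count > 2:
--         enc = enc + str(count - 1)
--     if not enc[-1].isdigit():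
--         enc = enc + "0"
--     return enc
-- ===== SOURCE B (Python) =====
-- def encode_rle16(data):
--     chars = [chr(int(s, 16) + 65) for s in data]
--     parts = []
--     i = 0
--     n = len(chars)
--     while i < n:
--         j = i
--         while j < n and chars[j] == chars[i]:
--             j += 1
--         value, count = chars[i], j - i
--         parts.append(value)
--         if count == 2:
--             parts.append(value)
--         elif count > 2:
--             parts.append(str(count - 1))
--         i = j
--     enc = "".join(parts)
--     if not enc[-1].isdigit():
--         enc += "0"
--     return enc
-- ===== Notes on version B (the rewrite author's own statement) =====
-- stated objective: alternative
-- what changed: Replaces A's single-pass prev/count state machine with its duplicated mid-loop and post-loop flush by a two-phase scan: first map every symbol to its character, then walk the character list run by run with two indices, emitting each run in one uniform shape.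
-- outside the precondition, e.g. on encode_rle16(['71']): A returns '²', B returns '²'
import Mathlib
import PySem

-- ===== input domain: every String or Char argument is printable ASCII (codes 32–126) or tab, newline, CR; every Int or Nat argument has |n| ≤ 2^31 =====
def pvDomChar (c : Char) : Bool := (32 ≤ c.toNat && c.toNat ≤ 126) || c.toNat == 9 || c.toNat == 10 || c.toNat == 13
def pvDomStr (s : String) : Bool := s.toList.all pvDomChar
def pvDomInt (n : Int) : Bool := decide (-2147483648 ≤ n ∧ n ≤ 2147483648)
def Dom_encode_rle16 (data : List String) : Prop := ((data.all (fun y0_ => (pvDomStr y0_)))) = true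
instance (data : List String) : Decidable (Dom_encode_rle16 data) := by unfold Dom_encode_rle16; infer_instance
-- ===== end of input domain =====

-- B re-implements A's run-length encoder as a two-phase scan (map symbols to chars, then emit runs
-- uniformly), removing A's prev/count state machine and its duplicated flush code; same cost.

-- chr(v + 65); exact under Pre_ (0 ≤ v+65 ≤ 127)
def pvChr (v : Int) : Char := Char.ofNat (v + 65).toNat

-- ===== PORT A =====
-- the run-flush code A writes twice (inside the loop and after it), verbatim
def pvFlushA (enc prev : List Char) (count : Int) : List Char :=
  let enc := enc ++ prev
  if count = 2 then enc ++ prev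
  else if count > 2 then enc ++ (PySem.Int.toStr (count - 1)).toList
  else enc

def pvStepA (st : List Char × List Char × Int) (symbol : String) : List Char × List Char × Int :=
  match PySem.Int.ofStrBase? symbol 16 with
  | none => st  -- Python raises ValueError here; such inputs are outside Pre_
  | some v =>
    let value := [pvChr v]
    if value ≠ st.2.1 then
      let enc := if st.2.1 ≠ [] then pvFlushA st.1 st.2.1 st.2.2 else st.1
      (enc, value, 1)
    else (st.1, st.2.1, st.2.2 + 1)

def encode_rle16 (data : List String) : String :=
  let st := data.foldl pvStepA ([], [], 1)
  let enc := pvFlushA st.1 st.2.1 st.2.2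
  match PySem.List.pyGet? enc (-1) with
  | none => String.ofList enc  -- IndexError on empty data; outside Pre_
  | some c => String.ofList (if !(PySem.Chars.isdigit c) then enc ++ ['0'] else enc)

-- ===== PORT B =====
def pvToC (s : String) : Char := pvChr ((PySem.Int.ofStrBase? s 16).getD 0)

-- the chunk B's part for one run: the char, twice for count 2, char then count-1 for longer runs
def pvPart (c : Char) (count : Nat) : List Char :=
  c :: (if count = 2 then [c] else if count > 2 then (PySem.Int.toStr ((count : Int) - 1)).toList else [])

-- B's run scan: the inner while advancing j over equal chars is takeWhile/dropWhile
def pvRuns : List Char → List (Char × Nat)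
  | [] => []
  | c :: cs => (c, (cs.takeWhile (· == c)).length + 1) :: pvRuns (cs.dropWhile (· == c))
termination_by cs => cs.length
decreasing_by simpa using Nat.lt_succ_of_le (List.length_dropWhile_le _ _)

def encode_rle16_alt (data : List String) : String :=
  let chars := data.map pvToC
  let enc := ((pvRuns chars).map (fun r => pvPart r.1 r.2)).flatten
  match PySem.List.pyGet? enc (-1) with
  | none => String.ofList enc  -- IndexError on empty data; outside Pre_
  | some c => String.ofList (if !(PySem.Chars.isdigit c) then enc ++ ['0'] else enc)

-- ===== PRECONDITION & SPEC =====
-- the code points above 127 on which Python's Unicode str.isdigit is true (ASCII digits excluded)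
def pvNonAsciiDigitRanges : List (Int × Int) := [(178, 179), (185, 185), (1632, 1641), (1776, 1785), (1984, 1993), (2406, 2415), (2534, 2543), (2662, 2671), (2790, 2799), (2918, 2927), (3046, 3055), (3174, 3183), (3302, 3311), (3430, 3439), (3558, 3567), (3664, 3673), (3792, 3801), (3872, 3881), (4160, 4169), (4240, 4249), (4969, 4977), (6112, 6121), (6160, 6169), (6470, 6479), (6608, 6618), (6784, 6793), (6800, 6809), (6992, 7001), (7088, 7097), (7232, 7241), (7248, 7257), (8304, 8304), (8308, 8313), (8320, 8329), (9312, 9320), (9332, 9340), (9352, 9360), (9450, 9450), (9461, 9469), (9471, 9471), (10102, 10110), (10112, 10120), (10122, 10130), (42528, 42537), (43216, 43225), (43264, 43273), (43472, 43481), (43504, 43513), (43600, 43609), (44016, 44025), (65296, 65305), (66720, 66729), (68160, 68163), (68912, 68921), (69216, 69224), (69714, 69722), (69734, 69743), (69872, 69881), (69942, 69951), (70096, 70105), (70384, 70393), (70736, 70745), (70864, 70873), (71248, 71257), (71360, 71369), (71472, 71481), (71904, 71913), (72016, 72025), (72784, 72793), (73040, 73049), (73120, 73129), (92768, 92777), (92864,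 92873), (93008, 93017), (120782, 120831), (123200, 123209), (123632, 123641), (125264, 125273), (127232, 127242), (130032, 130041)]

def pvSymbolOK (s : String) : Bool :=
  (PySem.Int.ofStrBase? s 16).elim false (fun v =>
    decide (0 ≤ v + 65 ∧ v + 65 < 1114112) &&
    !decide (55296 ≤ v + 65 ∧ v + 65 < 57344) &&
    pvNonAsciiDigitRanges.all (fun r => decide (v + 65 < r.1 ∨ r.2 < v + 65)))

-- Pre_ excludes inputs where A raises (empty data: IndexError; int(s,16) or chr rejecting a symbol:
-- ValueError) and, although A still returns there, symbols whose chr(v+65) is a lone surrogate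
-- (unrepresentable as a Lean Char, and the returned string is not even UTF-8-encodable) or a non-ASCII Unicode digit (str.isdigit is beyond the ASCII-exact model).
def Pre_encode_rle16 (data : List String) : Prop :=
  data ≠ [] ∧ data.all pvSymbolOK = true
instance (data : List String) : Decidable (Pre_encode_rle16 data) := by
  unfold Pre_encode_rle16; infer_instance

def pvWitness_encode_rle16 : List String := ["7", "7", "f", " 1 "]

def Spec_encode_rle16 (data : List String) (out : String) : Prop := out = encode_rle16_alt data
instance (data : List String) (out : String) : Decidable (Spec_encode_rle16 data out) := by
  unfold Spec_encode_rle16; infer_instance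

-- ===== CLAIM (what is proved, stated in full; the proofs are below) =====
def Claim_equal_encode_rle16 : Prop := ∀ (data : List String), Dom_encode_rle16 data →
  Pre_encode_rle16 data → Spec_encode_rle16 data (encode_rle16 data)


-- ===== LEMMAS AND PROOFS =====

theorem pvFlush_part (enc : List Char) (p : Char) (n : Nat) (hn : 1 ≤ n) :
    pvFlushA enc [p] (n : Int) = enc ++ pvPart p n := by
  have e2 : ((n : Int) = 2) ↔ n = 2 := by omega
  have e3 : ((n : Int) > 2) ↔ n > 2 := by omega
  by_cases h2 : n = 2
  · subst h2; simp [pvFlushA, pvPart]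
  · by_cases h3 : n > 2
    · simp [pvFlushA, pvPart, e2, e3, h2, h3]
    · simp [pvFlushA, pvPart, e2, e3, h2, h3]

theorem pvLoopA (data : List String)
    (hp : ∀ s ∈ data, (PySem.Int.ofStrBase? s 16).isSome = true) :
    ∀ (enc : List Char) (p : Char) (n : Nat), 1 ≤ n →
    (pvFlushA (data.foldl pvStepA (enc, [p], (n : Int))).1
      (data.foldl pvStepA (enc, [p], (n : Int))).2.1
      (data.foldl pvStepA (enc, [p], (n : Int))).2.2) =
    enc ++ pvPart p (n + ((data.map pvToC).takeWhile (· == p)).length)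
        ++ ((pvRuns ((data.map pvToC).dropWhile (· == p))).map (fun r => pvPart r.1 r.2)).flatten := by
  induction data with
  | nil =>
    intro enc p n hn
    simpa [pvRuns] using pvFlush_part enc p n hn
  | cons s rest ih =>
    intro enc p n hn
    have hs := hp s (List.mem_cons_self ..)
    obtain ⟨v, hv⟩ := Option.isSome_iff_exists.mp hs
    have hrest : ∀ s' ∈ rest, (PySem.Int.ofStrBase? s' 16).isSome = true :=
      fun s' h => hp s' (List.mem_cons_of_mem _ h)
    have htoc : pvToC s = pvChr v := by simp [pvToC, hv]
    by_cases hcp : pvChr v = p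
    · have hstep : pvStepA (enc, [p], (n : Int)) s = (enc, [p], ((n + 1 : Nat) : Int)) := by
        simp [pvStepA, hv, hcp]
      have := ih hrest enc p (n + 1) (by omega)
      simp only [List.foldl_cons, hstep, List.map_cons, htoc, hcp,
        List.takeWhile_cons, List.dropWhile_cons, BEq.rfl, if_true, List.length_cons]
      simp only [this]
      simp [Nat.add_assoc, Nat.add_comm]
    · have hstep : pvStepA (enc, [p], (n : Int)) s =
          (pvFlushA enc [p] (n : Int), [pvChr v], ((1 : Nat) : Int)) := by
        simp [pvStepA, hv, hcp]
      have hne : (pvChr v == p) = false := by simp [hcp]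
      have := ih hrest (pvFlushA enc [p] (n : Int)) (pvChr v) 1 (by omega)
      simp only [List.foldl_cons, hstep, this, List.map_cons, htoc,
        List.takeWhile_cons, List.dropWhile_cons, hne, if_false, Bool.false_eq_true]
      rw [pvFlush_part enc p n hn]
      simp only [pvRuns, List.map_cons, List.flatten_cons, List.length_nil, Nat.add_zero]
      simp [List.append_assoc, Nat.add_comm]

theorem pvEnc_eq (data : List String)
    (hne : data ≠ [])
    (hp : ∀ s ∈ data, (PySem.Int.ofStrBase? s 16).isSome = true) :
    (pvFlushA (data.foldl pvStepA ([], [], 1)).1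
      (data.foldl pvStepA ([], [], 1)).2.1
      (data.foldl pvStepA ([], [], 1)).2.2) =
    ((pvRuns (data.map pvToC)).map (fun r => pvPart r.1 r.2)).flatten := by
  cases data with
  | nil => exact absurd rfl hne
  | cons s rest =>
    obtain ⟨v, hv⟩ := Option.isSome_iff_exists.mp (hp s (List.mem_cons_self ..))
    have hrest : ∀ s' ∈ rest, (PySem.Int.ofStrBase? s' 16).isSome = true :=
      fun s' h => hp s' (List.mem_cons_of_mem _ h)
    have hstep : pvStepA (([] : List Char), ([] : List Char), (1 : Int)) s =
        ([], [pvChr v], ((1 : Nat) : Int)) := by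
      simp [pvStepA, hv]
    have htoc : pvToC s = pvChr v := by simp [pvToC, hv]
    have hmain := pvLoopA rest hrest [] (pvChr v) 1 (by omega)
    simp only [List.foldl_cons, hstep, hmain, List.map_cons, htoc, pvRuns,
      List.flatten_cons, List.nil_append]
    simp [Nat.add_comm]

-- ===== VERDICT (by name: the statement is the Claim_ definition above) =====
theorem encode_rle16_spec : Claim_equal_encode_rle16 := by
  intro data _ hpre
  obtain ⟨hne, hall⟩ := hpre
  have hp : ∀ s ∈ data, (PySem.Int.ofStrBase? s 16).isSome = true := by
    intro s hs
    have := List.all_eq_true.mp hall s hs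
    cases h : PySem.Int.ofStrBase? s 16 with
    | none => simp [pvSymbolOK, h] at this
    | some v => rfl
  show encode_rle16 data = encode_rle16_alt data
  simp only [encode_rle16, encode_rle16_alt, pvEnc_eq data hne hp]
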